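-- pv_equiv track=rewrite | github.com/BorisTyshkevich/rtve-dl | src/rtve_dl/rtve/png_thumbnail.py | _get_alfabet
-- ===== SOURCE A (Python) =====
-- def _get_alfabet(t: str) -> str:
--     # Port of Descargavideos' PNG_RTVE_Data::getAlfabet
--     r = []
--     e = 0
--     n = 0
--     for ch in t:
--         if n == 0:
--             r.append(ch)
--             e = (e + 1) % 4
--             n = e
--         else:
--             n -= 1
--     return "".join(r)
-- ===== SOURCE B (Python) =====
-- def _get_alfabet(t: str) -> str:
--     # Jump directly to each selected index with the cyclic step pattern 2,3,4,1
--     steps = (2, 3, 4, 1)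
--     r = []
--     i = 0
--     k = 0
--     while i < len(t):
--         r.append(t[i])
--         i += steps[k % 4]
--         k += 1
--     return "".join(r)
-- ===== Notes on version B (the rewrite author's own statement) =====
-- stated objective: alternative
-- what changed: Replaced the per-character countdown state machine (e,n counters updated on every char) by direct index jumps using the precomputed cyclic step table (2,3,4,1), touching only the selected positions.
import Mathlib
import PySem

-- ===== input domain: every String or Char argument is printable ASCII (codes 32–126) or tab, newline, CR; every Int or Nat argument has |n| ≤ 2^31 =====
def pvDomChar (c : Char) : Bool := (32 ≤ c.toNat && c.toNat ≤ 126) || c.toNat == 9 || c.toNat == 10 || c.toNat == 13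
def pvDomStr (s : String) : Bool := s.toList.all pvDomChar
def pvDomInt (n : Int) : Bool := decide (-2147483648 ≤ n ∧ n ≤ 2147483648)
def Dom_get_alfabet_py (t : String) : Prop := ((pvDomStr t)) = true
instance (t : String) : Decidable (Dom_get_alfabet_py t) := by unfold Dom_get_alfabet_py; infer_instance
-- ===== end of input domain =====

-- B replaces A's per-character countdown state machine by direct index jumps
-- with the cyclic step table (2,3,4,1); return values proved equal on all inputs.

-- ===== PORT A =====
-- the for-loop body over state (r, e, n)
def get_alfabet_py (t : String) : String :=
  let st := t.toList.foldl
    (fun (acc : List Char × Nat × Nat) ch =>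
      let (r, e, n) := acc
      if n = 0 then
        let e' := (e + 1) % 4
        (r ++ [ch], e', e')
      else
        (r, e, n - 1))
    ([], 0, 0)
  String.ofList st.1

-- ===== PORT B =====
-- steps = (2, 3, 4, 1); steps[k % 4]
def pvStepOf (k : Nat) : Nat :=
  match k % 4 with
  | 0 => 2
  | 1 => 3
  | 2 => 4
  | _ => 1

theorem pvStepOf_pos (k : Nat) : 1 ≤ pvStepOf k := by
  unfold pvStepOf
  rcases h : k % 4 with _ | _ | _ | m <;> simp

-- while i < len(t): append t[i]; i += steps[k % 4]; k += 1
def pvAltLoop (cs : List Char) (i k : Nat) : List Char :=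
  if h : i < cs.length then
    cs[i] :: pvAltLoop cs (i + pvStepOf k) (k + 1)
  else
    []
termination_by cs.length - i
decreasing_by
  have := pvStepOf_pos k
  omega

def get_alfabet_py_alt (t : String) : String :=
  String.ofList (pvAltLoop t.toList 0 0)

-- ===== PRECONDITION & SPEC =====
def Spec_get_alfabet_py (t : String) (out : String) : Prop := out = get_alfabet_py_alt t
instance (t : String) (out : String) : Decidable (Spec_get_alfabet_py t out) := by unfold Spec_get_alfabet_py; infer_instance

-- ===== CLAIM (what is proved, stated in full; the proofs are below) =====
def Claim_equal_get_alfabet_py : Prop := ∀ (t : String), Dom_get_alfabet_py t → Spec_get_alfabet_py t (get_alfabet_py t)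

-- ===== LEMMAS AND PROOFS =====

-- pure characterization of A's loop output from state (e, n)
def pvG : List Char → Nat → Nat → List Char
  | [], _, _ => []
  | c :: cs, e, 0 => c :: pvG cs ((e + 1) % 4) ((e + 1) % 4)
  | _ :: cs, e, n + 1 => pvG cs e n

-- A's foldl accumulates r ++ pvG cs e n in its first component
theorem pvFoldA_eq (cs : List Char) : ∀ (r : List Char) (e n : Nat),
    (cs.foldl
      (fun (acc : List Char × Nat × Nat) ch =>
        let (r, e, n) := acc
        if n = 0 then
          let e' := (e + 1) % 4
          (r ++ [ch], e', e')
        else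
          (r, e, n - 1))
      (r, e, n)).1 = r ++ pvG cs e n := by
  induction cs with
  | nil => intro r e n; simp [pvG]
  | cons c cs ih =>
    intro r e n
    cases n with
    | zero => simp [List.foldl, pvG, ih]
    | succ m => simp [List.foldl, pvG, ih]

-- skipping n chars of A's countdown is a drop
theorem pvG_skip (n : Nat) : ∀ (l : List Char) (e : Nat),
    pvG l e n = pvG (l.drop n) e 0 := by
  induction n with
  | zero => intro l e; simp
  | succ m ih =>
    intro l e
    cases l with
    | nil => simp [pvG]
    | cons c cs => simpa [pvG] using ih cs e

-- B's index-jump loop produces exactly A's selection from the current suffix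
theorem pvAltLoop_eq_pvG (cs : List Char) (i k : Nat) :
    pvAltLoop cs i k = pvG (cs.drop i) (k % 4) 0 := by
  rw [pvAltLoop]
  split
  · next h =>
    have hdrop : cs.drop i = cs[i] :: cs.drop (i + 1) := List.drop_eq_getElem_cons h
    rw [hdrop]
    have ih := pvAltLoop_eq_pvG cs (i + pvStepOf k) (k + 1)
    rw [ih]
    have hstep : pvStepOf k = (k % 4 + 1) % 4 + 1 := by
      unfold pvStepOf
      rcases hm : k % 4 with _ | _ | _ | m
      · simp
      · simp
      · simp
      · have h4 : k % 4 < 4 := Nat.mod_lt _ (by omega)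
        have hm0 : m = 0 := by omega
        subst hm0
        simp
    have hmod : (k % 4 + 1) % 4 = (k + 1) % 4 := by conv_rhs => rw [Nat.add_mod]
    have harg : i + pvStepOf k = i + 1 + (k % 4 + 1) % 4 := by rw [hstep]; omega
    rw [pvG]
    conv_rhs => rw [pvG_skip, List.drop_drop, ← harg, hmod]
  · next h =>
    rw [List.drop_eq_nil_of_le (by omega)]
    simp [pvG]
termination_by cs.length - i
decreasing_by
  have := pvStepOf_pos k
  omega

-- ===== VERDICT (by name: the statement is the Claim_ definition above) =====
theorem get_alfabet_py_spec : Claim_equal_get_alfabet_py := by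
  intro t _
  unfold Spec_get_alfabet_py get_alfabet_py get_alfabet_py_alt
  rw [pvAltLoop_eq_pvG]
  simp [pvFoldA_eq]
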